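-- pv_equiv track=rewrite | github.com/pypi-data/pypi-mirror-322 | packages/labelme-toolkit/labelme_toolkit-1.3.3.tar.gz/labelme_toolkit-1.3.3/labelme_toolkit/_formats.py | pformat_list
-- ===== SOURCE A (Python) =====
-- def pformat_list(list, max_seq_length=10):
--     text = "["
--     for i, item in enumerate(list):
--         text += f"{item!r}, "
--         if i == max_seq_length - 1:
--             text += "...]"
--             break
--     else:
--         if text != "[":
--             text = text[:-2]
--         text += "]"
--     return text
-- ===== SOURCE B (Python) =====
-- def pformat_list(list, max_seq_length=10):
--     truncated = max_seq_length >= 1 and len(list) >= max_seq_length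
--     items = list[:max_seq_length] if truncated else list
--     body = ", ".join(repr(x) for x in items)
--     return "[" + body + (", ...]" if truncated else "]")
-- ===== Notes on version B (the rewrite author's own statement) =====
-- stated objective: simpler
-- what changed: Replaces A's accumulate-and-break loop (with the for/else trailing-separator strip) by an up-front truncation test, a slice and a ', '.join plus a conditional suffix.
import Mathlib
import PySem

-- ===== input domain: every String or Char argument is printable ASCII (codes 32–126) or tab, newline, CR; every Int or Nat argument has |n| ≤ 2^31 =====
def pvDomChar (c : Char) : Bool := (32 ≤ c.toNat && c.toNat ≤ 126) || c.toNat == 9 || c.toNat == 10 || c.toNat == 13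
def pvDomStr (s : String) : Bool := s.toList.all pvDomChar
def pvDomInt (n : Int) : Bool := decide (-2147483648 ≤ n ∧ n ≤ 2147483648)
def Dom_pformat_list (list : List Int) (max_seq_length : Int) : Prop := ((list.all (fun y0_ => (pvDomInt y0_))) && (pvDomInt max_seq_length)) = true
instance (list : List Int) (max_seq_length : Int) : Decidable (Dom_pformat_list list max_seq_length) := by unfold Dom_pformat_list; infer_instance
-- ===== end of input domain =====

-- B replaces A's accumulate-and-break loop by an up-front truncation test, a slice and a ", ".join — simpler, same cost.

-- ===== PORT A =====
-- the for/else loop over enumerate(list), carrying the accumulated text (as List Char);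
-- text[:-2] is PySem.Chars.slice text none (some (-2)) — exact (Python slice semantics)
def pformatLoopA (m : Int) : List (Int × Int) → List Char → List Char
  | [], text =>
      (if text ≠ ['['] then PySem.Chars.slice text none (some (-2)) else text) ++ [']']
  | (i, item) :: rest, text =>
      let t := text ++ PySem.Int.toChars item ++ [',', ' ']
      if i = m - 1 then t ++ ['.', '.', '.', ']'] else pformatLoopA m rest t

def pformat_list (list : List Int) (max_seq_length : Int) : String :=
  String.ofList (pformatLoopA max_seq_length (PySem.List.enumerate list) ['['])

-- ===== PORT B =====
def pformat_list_alt (list : List Int) (max_seq_length : Int) : String :=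
  let truncated := decide (1 ≤ max_seq_length ∧ max_seq_length ≤ (list.length : Int))
  let items := if truncated then PySem.List.slice list none (some max_seq_length) else list
  let body := PySem.Chars.join [',', ' '] (items.map PySem.Int.toChars)
  String.ofList (['['] ++ body ++ (if truncated then [',', ' ', '.', '.', '.', ']'] else [']']))

-- ===== PRECONDITION & SPEC =====
def Spec_pformat_list (list : List Int) (max_seq_length : Int) (out : String) : Prop := out = pformat_list_alt list max_seq_length
instance (list : List Int) (max_seq_length : Int) (out : String) : Decidable (Spec_pformat_list list max_seq_length out) := by unfold Spec_pformat_list; infer_instance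

-- ===== CLAIM (what is proved, stated in full; the proofs are below) =====
def Claim_equal_pformat_list : Prop := ∀ (list : List Int) (max_seq_length : Int), Dom_pformat_list list max_seq_length → Spec_pformat_list list max_seq_length (pformat_list list max_seq_length)

-- ===== LEMMAS AND PROOFS =====

-- what A's loop body appends for each list element
def renderA (xs : List Int) : List Char :=
  (xs.map (fun x => PySem.Int.toChars x ++ [',', ' '])).flatten

theorem renderA_nil : renderA [] = [] := rfl

theorem renderA_cons (x : Int) (xs : List Int) :
    renderA (x :: xs) = PySem.Int.toChars x ++ [',', ' '] ++ renderA xs := by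
  simp [renderA]

-- trailing ", " of renderA vs ", ".join
theorem renderA_eq_join (x : Int) (xs : List Int) :
    renderA (x :: xs) =
      PySem.Chars.join [',', ' '] ((x :: xs).map PySem.Int.toChars) ++ [',', ' '] := by
  induction xs generalizing x with
  | nil => simp [renderA, PySem.Chars.join, List.intercalate]
  | cons y ys ih =>
      rw [renderA_cons, ih y]
      simp [PySem.Chars.join, List.intercalate]

-- A's loop when the break fires within xs (index i, break index m-1)
theorem loopA_break (m : Int) (xs : List Int) (i : Int) (text : List Char)
    (h1 : i ≤ m - 1) (h2 : m - i ≤ (xs.length : Int)) :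
    pformatLoopA m (PySem.List.enumerate xs i) text =
      text ++ renderA (xs.take (m - i).toNat) ++ ['.', '.', '.', ']'] := by
  induction xs generalizing i text with
  | nil => simp at h2; omega
  | cons x rest ih =>
      rw [PySem.List.enumerate_cons, pformatLoopA]
      by_cases hb : i = m - 1
      · simp [hb, renderA_cons, renderA_nil]
      · have h1' : i + 1 ≤ m - 1 := by omega
        have h2' : m - (i + 1) ≤ (rest.length : Int) := by
          simp at h2 ⊢; omega
        rw [if_neg hb, ih (i + 1) _ h1' h2']
        have ht : (m - i).toNat = (m - (i + 1)).toNat + 1 := by omega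
        simp [ht, renderA_cons]

-- A's loop when the break never fires
theorem loopA_nobreak (m : Int) (xs : List Int) (i : Int) (text : List Char)
    (h : ¬ (i ≤ m - 1 ∧ m - i ≤ (xs.length : Int))) :
    pformatLoopA m (PySem.List.enumerate xs i) text =
      (if text ++ renderA xs ≠ ['['] then
          PySem.Chars.slice (text ++ renderA xs) none (some (-2))
        else text ++ renderA xs) ++ [']'] := by
  induction xs generalizing i text with
  | nil => simp [PySem.List.enumerate_nil, pformatLoopA, renderA_nil]
  | cons x rest ih =>
      rw [PySem.List.enumerate_cons, pformatLoopA]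
      have hb : i ≠ m - 1 := by
        intro hi; exact h ⟨le_of_eq hi, by simp; omega⟩
      have h' : ¬ (i + 1 ≤ m - 1 ∧ m - (i + 1) ≤ (rest.length : Int)) := by
        intro ⟨a, b⟩; exact h ⟨by omega, by simp; omega⟩
      rw [if_neg hb, ih (i + 1) _ h']
      simp [renderA_cons]

-- dropping the trailing ", " (Python t[:-2]) of u ++ ", " gives back u
theorem slice_drop_two (u : List Char) :
    PySem.Chars.slice (u ++ [',', ' ']) none (some (-2)) = u := by
  have h2 : (0 : Nat) < 2 := by omega
  have := PySem.List.slice_to_neg_natCast (u ++ [',', ' ']) 2 h2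
  simp only [PySem.Chars.slice_eq_listSlice]
  rw [show ((-2 : Int)) = -((2 : Nat) : Int) by norm_num] at *
  rw [this]
  simp

-- ===== VERDICT (by name: the statement is the Claim_ definition above) =====
theorem pformat_list_spec : Claim_equal_pformat_list := by
  intro list m _
  unfold Spec_pformat_list pformat_list pformat_list_alt
  by_cases htr : 1 ≤ m ∧ m ≤ (list.length : Int)
  · -- truncated: the break fires at index m-1
    obtain ⟨hm1, hml⟩ := htr
    rw [loopA_break m list 0 ['['] (by omega) (by omega)]
    have hms : m = ((m.toNat : Int)) := by omega
    have hslice : PySem.List.slice list none (some m) = list.take m.toNat := by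
      rw [hms]; exact PySem.List.slice_to_natCast list m.toNat
    have hne : list.take m.toNat ≠ [] := by
      cases list with
      | nil => simp at hml; omega
      | cons a l => simp; omega
    obtain ⟨y, ys, hy⟩ := List.exists_cons_of_ne_nil hne
    simp only [if_pos (by exact decide_eq_true (⟨hm1, hml⟩ : 1 ≤ m ∧ m ≤ (list.length : Int)))] at *
    rw [hslice]
    have : m - 0 = m := by ring
    rw [this, hy, renderA_eq_join]
    rw [← hy, hslice] at *
    simp
  · -- not truncated: the for/else branch
    rw [loopA_nobreak m list 0 ['['] (by intro ⟨h1, h2⟩; exact htr ⟨by omega, by omega⟩)]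
    simp only [if_neg (by simpa using htr : ¬ (1 ≤ m ∧ m ≤ (list.length : Int))), decide_eq_true_eq]
    cases list with
    | nil => simp [renderA_nil, PySem.Chars.join, List.intercalate]
    | cons x rest =>
        have hjoin := renderA_eq_join x rest
        have hne : ['['] ++ renderA (x :: rest) ≠ ['['] := by
          rw [renderA_cons]
          intro hcontra
          have hlen := congrArg List.length hcontra
          simp at hlen
        rw [if_pos hne, hjoin, ← List.append_assoc, slice_drop_two]
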